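-- pv_equiv track=rewrite | github.com/lmeninato/raftarch | leader_failure.py | generate_local_clusters
-- ===== SOURCE A (Python) =====
-- def generate_local_clusters(n, k=3):
--     '''
--     n: Number of Raft clusters to utilize in database
--     k: Number of nodes per raft cluster
--     '''
--     clusters = []
--     port = 5001
--     host = 'localhost'
--
--     for _ in range(n):
--         cluster = []
--         for _ in range(k):
--             node = host + ':' + str(port)
--             cluster.append(node)
--             port += 1
--         clusters.append(cluster)
--     return clusters
-- ===== SOURCE B (Python) =====
-- def generate_local_clusters(n, k=3):
--     '''
--     n: Number of Raft clusters to utilize in database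
--     k: Number of nodes per raft cluster
--     '''
--     total = max(n, 0) * max(k, 0)
--     nodes = ['localhost:' + str(p) for p in range(5001, 5001 + total)]
--     return [nodes[i * k:(i + 1) * k] for i in range(n)]
-- ===== Notes on version B (the rewrite author's own statement) =====
-- stated objective: alternative
-- what changed: Two staged passes instead of nested accumulator loops: first build the flat list of all n*k node names in one pass, then partition it into clusters by slicing nodes[i*k:(i+1)*k].
import Mathlib
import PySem

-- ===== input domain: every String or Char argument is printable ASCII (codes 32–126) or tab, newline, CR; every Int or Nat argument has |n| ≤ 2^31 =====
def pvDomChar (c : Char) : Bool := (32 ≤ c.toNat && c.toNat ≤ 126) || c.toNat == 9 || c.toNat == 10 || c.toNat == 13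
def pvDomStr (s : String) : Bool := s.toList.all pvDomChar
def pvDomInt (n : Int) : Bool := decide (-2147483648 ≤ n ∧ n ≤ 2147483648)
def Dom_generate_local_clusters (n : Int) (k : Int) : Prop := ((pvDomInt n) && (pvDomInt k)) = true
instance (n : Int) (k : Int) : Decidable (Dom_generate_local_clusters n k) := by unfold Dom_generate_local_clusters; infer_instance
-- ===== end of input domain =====

-- B builds the flat list of all n*k node names first and then partitions it by slicing,
-- instead of A's nested loops threading a running port counter; same output, different decomposition.

-- ===== PORT A =====
-- literal transliteration: nested for-loops threading (clusters, port) resp. (cluster, port)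
def generate_local_clusters (n : Int) (k : Int) : List (List String) :=
  let host := "localhost"
  let st :=
    (PySem.List.pyRange 0 n 1).foldl
      (fun (st : List (List String) × Int) _ =>
        let inner :=
          (PySem.List.pyRange 0 k 1).foldl
            (fun (st2 : List String × Int) _ =>
              (st2.1 ++ [host ++ ":" ++ PySem.Int.toStr st2.2], st2.2 + 1))
            ([], st.2)
        (st.1 ++ [inner.1], inner.2))
      ([], 5001)
  st.1

-- ===== PORT B =====
-- pass 1: the flat list of node names; pass 2: partition by slicing nodes[i*k:(i+1)*k]
def generate_local_clusters_alt (n : Int) (k : Int) : List (List String) :=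
  let total := max n 0 * max k 0
  let nodes :=
    (PySem.List.pyRange 5001 (5001 + total) 1).map
      (fun p => "localhost:" ++ PySem.Int.toStr p)
  (PySem.List.pyRange 0 n 1).map
    (fun i => PySem.List.slice nodes (some (i * k)) (some ((i + 1) * k)))

-- ===== PRECONDITION & SPEC =====
def Spec_generate_local_clusters (n : Int) (k : Int) (out : List (List String)) : Prop := out = generate_local_clusters_alt n k
instance (n : Int) (k : Int) (out : List (List String)) : Decidable (Spec_generate_local_clusters n k out) := by unfold Spec_generate_local_clusters; infer_instance

-- ===== CLAIM (what is proved, stated in full; the proofs are below) =====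
def Claim_equal_generate_local_clusters : Prop := ∀ (n : Int) (k : Int), Dom_generate_local_clusters n k → Spec_generate_local_clusters n k (generate_local_clusters n k)

-- ===== LEMMAS AND PROOFS =====

-- inner loop of A: appends l.length nodes with consecutive ports starting at p
lemma pv_inner (l : List Int) (acc : List String) (p : Int) :
    l.foldl
      (fun (st2 : List String × Int) _ =>
        (st2.1 ++ ["localhost" ++ ":" ++ PySem.Int.toStr st2.2], st2.2 + 1))
      (acc, p)
    = (acc ++ (List.range l.length).map
        (fun (j : Nat) => "localhost:" ++ PySem.Int.toStr (p + (j : Int))), p + l.length) := by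
  induction l generalizing acc p with
  | nil => simp
  | cons x xs ih =>
    simp only [List.foldl_cons, ih, List.length_cons, Prod.mk.injEq]
    refine ⟨?_, by push_cast; ring⟩
    rw [List.range_succ_eq_map]
    simp only [List.map_cons, List.map_map, List.append_assoc, List.singleton_append,
      Function.comp_def, List.append_cancel_left_eq, List.cons.injEq]
    refine ⟨by congr 2; norm_num, ?_⟩
    apply List.map_congr_left
    intro j _
    congr 2
    push_cast
    ring

-- outer loop of A in terms of the closed form
lemma pv_outer (l : List Int) (k : Int) (acc : List (List String)) (p : Int) :
    l.foldl
      (fun (st : List (List String) × Int) _ =>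
        let inner :=
          (PySem.List.pyRange 0 k 1).foldl
            (fun (st2 : List String × Int) _ =>
              (st2.1 ++ ["localhost" ++ ":" ++ PySem.Int.toStr st2.2], st2.2 + 1))
            ([], st.2)
        (st.1 ++ [inner.1], inner.2))
      (acc, p)
    = (acc ++ (List.range l.length).map
        (fun (i : Nat) => (List.range k.toNat).map
          (fun (j : Nat) => "localhost:" ++ PySem.Int.toStr (p + (i : Int) * k.toNat + (j : Int)))),
       p + l.length * k.toNat) := by
  have hlen : (PySem.List.pyRange 0 k 1).length = k.toNat := by
    rw [PySem.List.length_pyRange_one]; norm_num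
  induction l generalizing acc p with
  | nil => simp
  | cons x xs ih =>
    simp only [List.foldl_cons]
    rw [pv_inner, ih]
    simp only [List.length_cons, Prod.mk.injEq, hlen, List.nil_append]
    refine ⟨?_, by push_cast; ring⟩
    rw [List.range_succ_eq_map]
    simp only [List.map_cons, List.map_map, List.append_assoc, List.singleton_append,
      Function.comp_def, List.append_cancel_left_eq, List.cons.injEq]
    constructor
    · apply List.map_congr_left
      intro j _
      congr 2
      push_cast
      ring
    · apply List.map_congr_left
      intro i _
      apply List.map_congr_left
      intro j _
      congr 2
      push_cast
      ring

-- a drop/take window of a mapped range is the shifted mapped range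
lemma pv_window (N d c : Nat) (f : Nat → String) (h : d + c ≤ N) :
    (((List.range N).map f).drop d).take c
    = (List.range c).map (fun j => f (d + j)) := by
  apply List.ext_getElem
  · simp; omega
  · intro m h1 h2
    simp only [List.getElem_take, List.getElem_drop, List.getElem_map, List.getElem_range]

-- slicing the empty list gives the empty list
lemma pv_slice_nil {α : Type} (a b : Option Int) : PySem.List.slice ([] : List α) a b = [] := by
  rw [List.eq_nil_iff_forall_not_mem]
  intro x hx
  exact (List.not_mem_nil) (PySem.List.mem_of_mem_slice _ _ _ hx)

-- ===== VERDICT (by name: the statement is the Claim_ definition above) =====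
theorem generate_local_clusters_spec : Claim_equal_generate_local_clusters := by
  intro n k _
  unfold Spec_generate_local_clusters generate_local_clusters generate_local_clusters_alt
  simp only []
  rw [pv_outer]
  rw [PySem.List.pyRange_one 0 n]
  simp only [Int.sub_zero, Int.zero_add, List.length_map, List.length_range, List.nil_append,
    List.map_map, Function.comp_def]
  apply List.map_congr_left
  intro i hi
  have hi' : (i : Int) < n := by
    have := List.mem_range.mp hi
    omega
  by_cases hk : k ≤ 0
  · -- flat list is empty, slice of [] is []; A's inner range is empty too
    have hkn : k.toNat = 0 := by omega
    have hnodes : PySem.List.pyRange 5001 (5001 + max n 0 * max k 0) 1 = [] := by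
      apply PySem.List.pyRange_one_eq_nil
      have : max k 0 = 0 := by omega
      simp [this]
    rw [hnodes]
    simp [hkn, pv_slice_nil]
  · push Not at hk
    have h0i : (0 : Int) ≤ (i : Int) * k := by positivity
    have h0i1 : (0 : Int) ≤ ((i : Int) + 1) * k := by positivity
    rw [PySem.List.slice_toNat _ h0i h0i1, PySem.List.pyRange_one]
    have hNk : (5001 + max n 0 * max k 0 - 5001) = n * k := by
      have h1 : max n 0 = n := by omega
      have h2 : max k 0 = k := by omega
      rw [h1, h2]; ring
    rw [hNk, List.map_map]
    have hd : (((i : Int) * k).toNat : Int) = (i : Int) * k := by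
      exact Int.toNat_of_nonneg h0i
    have hc : (((i : Int) + 1) * k).toNat - ((i : Int) * k).toNat = k.toNat := by
      have h1 : ((i : Int) + 1) * k = (i : Int) * k + k := by ring
      omega
    rw [hc]
    have hbound : ((i : Int) * k).toNat + k.toNat ≤ (n * k).toNat := by
      have h2 : ((i : Int) + 1) * k ≤ n * k := by
        apply mul_le_mul_of_nonneg_right _ (le_of_lt hk)
        omega
      have h1 : ((i : Int) + 1) * k = (i : Int) * k + k := by ring
      omega
    rw [pv_window _ _ _ _ hbound]
    apply List.map_congr_left
    intro j hj
    congr 2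
    have hkk : (k.toNat : Int) = k := by omega
    push_cast [hd]
    rw [hkk]
    ring
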